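-- pv_equiv track=rewrite | github.com/r2dev2/samepack | samepack/analyze.py | __remove_exports
-- ===== SOURCE A (Python) =====
-- def __remove_exports(contents: str) -> str:
--     buff = []
--     for line in contents.split("\n"):
--         if line[:7] == "export ":
--             buff.append(line[7:])
--         else:
--             buff.append(line)
--     return "\n".join(buff)
-- ===== SOURCE B (Python) =====
-- def __remove_exports(contents: str) -> str:
--     # Every line start is either position 0 or follows a newline; prefixing one
--     # newline makes them uniform, so a single str.replace strips the keyword.
--     return ("\n" + contents).replace("\nexport ", "\n")[1:]
-- ===== Notes on version B (the rewrite author's own statement) =====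
-- stated objective: idiomatic
-- what changed: Replaces the split/per-line loop/join pipeline with a single string-level pass: prepend one newline so every line start follows a newline, then one replace of newline-plus-keyword by a bare newline and drop the added first character.
import Mathlib
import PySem

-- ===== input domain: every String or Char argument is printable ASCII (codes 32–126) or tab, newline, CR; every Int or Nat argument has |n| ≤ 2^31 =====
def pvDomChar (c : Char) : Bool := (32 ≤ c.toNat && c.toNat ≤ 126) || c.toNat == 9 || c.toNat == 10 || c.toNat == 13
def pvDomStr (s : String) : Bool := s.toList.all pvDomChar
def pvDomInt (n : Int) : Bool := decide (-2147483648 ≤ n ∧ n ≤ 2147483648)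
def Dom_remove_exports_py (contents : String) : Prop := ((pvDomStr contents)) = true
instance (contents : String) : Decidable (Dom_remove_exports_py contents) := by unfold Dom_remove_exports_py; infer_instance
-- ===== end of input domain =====

-- B replaces A's split/loop/join with one string-level replace pass: prefixing a newline
-- makes every line start uniform, so '("\n"+s).replace("\nexport ", "\n")[1:]' strips the keyword.

-- ===== PORT A =====
def remove_exports_py (contents : String) : String :=
  PySem.Str.join "\n"
    (((PySem.Str.split? contents "\n").getD []).foldl
      (fun buff line =>
        buff ++ [if PySem.Str.slice line none (some 7) == "export "
                 then PySem.Str.slice line (some 7) none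
                 else line]) [])

-- ===== PORT B =====
def remove_exports_py_alt (contents : String) : String :=
  PySem.Str.slice (PySem.Str.replace ("\n" ++ contents) "\nexport " "\n") (some 1) none

-- ===== PRECONDITION & SPEC =====
def Spec_remove_exports_py (contents : String) (out : String) : Prop := out = remove_exports_py_alt contents
instance (contents : String) (out : String) : Decidable (Spec_remove_exports_py contents out) := by unfold Spec_remove_exports_py; infer_instance

-- ===== CLAIM =====
def Claim_equal_remove_exports_py : Prop := ∀ (contents : String), Dom_remove_exports_py contents → Spec_remove_exports_py contents (remove_exports_py contents)

-- ===== LEMMAS AND PROOFS =====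

def pvExp : List Char := ['e', 'x', 'p', 'o', 'r', 't', ' ']

/-- split of a char list at '\n' (spec form of `PySem.Chars.splitOn · ['\n']`). -/
def pvS : List Char → List (List Char)
  | [] => [[]]
  | c :: t => if c = '\n' then [] :: pvS t else (pvS t).modifyHead (c :: ·)

/-- the common result: copy chars, stripping "export " right after each newline. -/
def pvJ : List Char → List Char
  | [] => []
  | c :: t =>
      if c = '\n' then '\n' :: pvJ (if pvExp.isPrefixOf t then t.drop 7 else t)
      else c :: pvJ t
termination_by l => l.length
decreasing_by
  · split_ifs <;> simp
  · simp

/-- the scan `PySem.Chars.replace.go ('\n'::pvExp) ['\n']` performs. -/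
def pvG : List Char → List Char
  | [] => []
  | c :: t =>
      if ('\n' :: pvExp).isPrefixOf (c :: t) then '\n' :: pvG (t.drop 7)
      else c :: pvG t
termination_by l => l.length
decreasing_by
  · simp
  · simp

def pvStrip (l : List Char) : List Char := if pvExp.isPrefixOf l then l.drop 7 else l

/-- strip every line except the first. -/
def pvMts : List (List Char) → List (List Char)
  | [] => []
  | h :: t => h :: t.map pvStrip

lemma pvS_ne_nil (l : List Char) : pvS l ≠ [] := by
  induction l with
  | nil => simp [pvS]
  | cons c t ih =>
      simp only [pvS]
      split_ifs
      · simp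
      · cases h : pvS t with
        | nil => exact absurd h ih
        | cons a b => simp [List.modifyHead]

lemma pvS_headI_prefix (l : List Char) : (pvS l).headI <+: l := by
  induction l with
  | nil => simp [pvS]
  | cons c t ih =>
      simp only [pvS]
      split_ifs with h
      · simp
      · cases hS : pvS t with
        | nil => exact absurd hS (pvS_ne_nil t)
        | cons a b =>
            rw [hS] at ih
            simpa [List.modifyHead] using ih

lemma pvS_append_noNL (p r : List Char) (hp : ∀ c ∈ p, c ≠ '\n') :
    pvS (p ++ r) = (pvS r).modifyHead (p ++ ·) := by
  induction p with
  | nil =>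
      cases h : pvS r with
      | nil => exact absurd h (pvS_ne_nil r)
      | cons a b => simp [List.modifyHead, h]
  | cons a p ih =>
      have ha : a ≠ '\n' := hp a (by simp)
      have ih' := ih (fun c hc => hp c (by simp [hc]))
      simp only [List.cons_append, pvS, if_neg ha, ih']
      cases h : pvS r with
      | nil => exact absurd h (pvS_ne_nil r)
      | cons x b => simp [List.modifyHead]

lemma pv_join_cons_char (c : Char) (h : List Char) (tl : List (List Char)) :
    PySem.Chars.join ['\n'] ((c :: h) :: tl) = c :: PySem.Chars.join ['\n'] (h :: tl) := by
  cases tl <;> simp [PySem.Chars.join, List.intercalate]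

lemma pv_join_nil_cons (x : List Char) (xs : List (List Char)) :
    PySem.Chars.join ['\n'] ([] :: x :: xs) = '\n' :: PySem.Chars.join ['\n'] (x :: xs) := by
  cases xs <;> simp [PySem.Chars.join, List.intercalate]

lemma pvG_eq_pvJ (l : List Char) : pvG l = pvJ l := by
  induction l using pvJ.induct with
  | case1 => simp [pvG, pvJ]
  | case2 t ih =>
      by_cases hp : pvExp.isPrefixOf t
      · simp [pvG, pvJ, List.isPrefixOf, hp] at ih ⊢
        exact ih
      · simp [pvG, pvJ, List.isPrefixOf, hp] at ih ⊢
        exact ih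
  | case3 c t hc ih =>
      have hnp : ¬ ('\n' :: pvExp).isPrefixOf (c :: t) := by
        simp [List.isPrefixOf]
        intro h; exact absurd h.symm hc
      simp [pvG, pvJ, hnp, hc, ih]

/-- the heart: join-with-strip of the split equals the direct scan. -/
lemma pvE (l : List Char) : PySem.Chars.join ['\n'] (pvMts (pvS l)) = pvJ l := by
  induction l using pvJ.induct with
  | case1 => simp [pvS, pvMts, pvJ, PySem.Chars.join, List.intercalate]
  | case2 t ih =>
      have key : PySem.Chars.join ['\n'] ((pvS t).map pvStrip)
          = pvJ (if pvExp.isPrefixOf t then t.drop 7 else t) := by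
        by_cases hp : pvExp.isPrefixOf t
        · obtain ⟨r, rfl⟩ := List.isPrefixOf_iff_prefix.mp hp
          have hnl : ∀ c ∈ pvExp, c ≠ '\n' := by
            intro c hc
            simp [pvExp] at hc
            rcases hc with rfl|rfl|rfl|rfl|rfl|rfl|rfl <;> decide
          have hdrop : List.drop 7 (pvExp ++ r) = r := List.drop_left (l₁ := pvExp) (l₂ := r)
          rw [if_pos hp, hdrop]
          rw [dif_pos hp, hdrop] at ih
          rw [pvS_append_noNL pvExp r hnl]
          cases hS : pvS r with
          | nil => exact absurd hS (pvS_ne_nil r)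
          | cons h tl =>
              have hstrip : pvStrip (pvExp ++ h) = h := by
                have hpre : pvExp.isPrefixOf (pvExp ++ h) :=
                  List.isPrefixOf_iff_prefix.mpr ⟨h, rfl⟩
                simp [pvStrip, hpre]
                exact List.drop_left (l₁ := pvExp) (l₂ := h)
              rw [hS] at ih
              simp only [pvMts] at ih
              simpa [List.modifyHead, hstrip] using ih
        · rw [if_neg hp]
          rw [dif_neg hp] at ih
          cases hS : pvS t with
          | nil => exact absurd hS (pvS_ne_nil t)
          | cons h tl =>
              have hh : ¬ pvExp.isPrefixOf h := by
                intro hc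
                exact hp (List.isPrefixOf_iff_prefix.mpr
                  ((List.isPrefixOf_iff_prefix.mp hc).trans
                    (by simpa [hS] using pvS_headI_prefix t)))
              have hstrip : pvStrip h = h := by simp [pvStrip, hh]
              rw [hS] at ih
              simp only [pvMts] at ih
              simpa [hstrip] using ih
      have hS2 : pvS ('\n' :: t) = [] :: pvS t := by simp [pvS]
      rw [hS2]
      cases hS : pvS t with
      | nil => exact absurd hS (pvS_ne_nil t)
      | cons h tl =>
          rw [hS] at key
          simp only [pvMts, List.map_cons] at key ⊢
          rw [pv_join_nil_cons]
          rw [key]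
          simp [pvJ]
  | case3 c t hc ih =>
      cases hS : pvS t with
      | nil => exact absurd hS (pvS_ne_nil t)
      | cons h tl =>
          have hS2 : pvS (c :: t) = (c :: h) :: tl := by
            simp [pvS, hc, hS, List.modifyHead]
          rw [hS] at ih
          rw [hS2]
          simp only [pvMts] at ih ⊢
          rw [pv_join_cons_char, ih]
          simp [pvJ, hc]

/-- strip every line (A's value on the split) equals the scan of the stripped input. -/
lemma pvD (l : List Char) :
    PySem.Chars.join ['\n'] ((pvS l).map pvStrip) = pvJ (pvStrip l) := by
  by_cases hp : pvExp.isPrefixOf l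
  · obtain ⟨r, rfl⟩ := List.isPrefixOf_iff_prefix.mp hp
    have hnl : ∀ c ∈ pvExp, c ≠ '\n' := by
            intro c hc
            simp [pvExp] at hc
            rcases hc with rfl|rfl|rfl|rfl|rfl|rfl|rfl <;> decide
    rw [pvS_append_noNL pvExp r hnl]
    cases hS : pvS r with
    | nil => exact absurd hS (pvS_ne_nil r)
    | cons h tl =>
        have hstrip : pvStrip (pvExp ++ h) = h := by
          have : pvExp.isPrefixOf (pvExp ++ h) :=
            List.isPrefixOf_iff_prefix.mpr ⟨h, rfl⟩
          simp [pvStrip, this]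
          exact List.drop_left (l₁ := pvExp) (l₂ := h)
        have : pvStrip (pvExp ++ r) = r := by
          simp [pvStrip, hp]
          exact List.drop_left (l₁ := pvExp) (l₂ := r)
        rw [this]
        have hE := pvE r
        rw [hS] at hE
        simp only [pvMts] at hE
        simpa [List.modifyHead, hstrip] using hE
  · cases hS : pvS l with
    | nil => exact absurd hS (pvS_ne_nil l)
    | cons h tl =>
        have hh : ¬ pvExp.isPrefixOf h := by
          intro hc
          exact hp (List.isPrefixOf_iff_prefix.mpr
            ((List.isPrefixOf_iff_prefix.mp hc).trans
              (by simpa [hS] using pvS_headI_prefix l)))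
        have hstrip : pvStrip h = h := by simp [pvStrip, hh]
        have : pvStrip l = l := by simp [pvStrip, hp]
        rw [this]
        have hE := pvE l
        rw [hS] at hE
        simp only [pvMts] at hE
        simpa [hstrip] using hE

lemma pv_replace_go (fuel : Nat) (l acc : List Char) (hf : l.length ≤ fuel) :
    PySem.Chars.replace.go ('\n' :: pvExp) ['\n'] fuel l acc = acc.reverse ++ pvG l := by
  induction fuel generalizing l acc with
  | zero =>
      have : l = [] := List.eq_nil_of_length_eq_zero (Nat.le_zero.mp hf)
      subst this
      rw [PySem.Chars.replace.go.eq_def]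
      simp [pvG]
  | succ fuel ih =>
      cases l with
      | nil => rw [PySem.Chars.replace.go.eq_def]; simp [pvG]
      | cons c t =>
          rw [PySem.Chars.replace.go.eq_def]
          simp only []
          by_cases hp : ('\n' :: pvExp).isPrefixOf (c :: t)
          · rw [if_pos hp]
            have hlen : (List.drop ('\n' :: pvExp).length (c :: t)).length ≤ fuel := by
              simp at hf ⊢; omega
            rw [ih _ _ hlen]
            have : List.drop ('\n' :: pvExp).length (c :: t) = t.drop 7 := by
              simp [pvExp]
            rw [this]
            simp [pvG, hp]
          · rw [if_neg hp]
            have hlen : t.length ≤ fuel := by simp at hf; omega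
            rw [ih _ _ hlen]
            simp [pvG, hp]

lemma pv_splitOn_go (fuel : Nat) (l cur : List Char) (acc : List (List Char))
    (hf : l.length ≤ fuel) :
    PySem.Chars.splitOn.go ['\n'] fuel l cur acc
      = acc.reverse ++ (pvS l).modifyHead (cur.reverse ++ ·) := by
  induction fuel generalizing l cur acc with
  | zero =>
      have : l = [] := List.eq_nil_of_length_eq_zero (Nat.le_zero.mp hf)
      subst this
      rw [PySem.Chars.splitOn.go.eq_def]
      simp [pvS, List.modifyHead]
  | succ fuel ih =>
      cases l with
      | nil => rw [PySem.Chars.splitOn.go.eq_def]; simp [pvS, List.modifyHead]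
      | cons c t =>
          rw [PySem.Chars.splitOn.go.eq_def]
          simp only []
          by_cases hc : c = '\n'
          · subst hc
            have hp : (['\n'] : List Char).isPrefixOf ('\n' :: t) := by
              simp [List.isPrefixOf]
            rw [if_pos hp]
            have hlen : (List.drop (['\n'] : List Char).length ('\n' :: t)).length ≤ fuel := by
              simp at hf ⊢; omega
            rw [ih _ _ _ hlen]
            simp [pvS, List.modifyHead]
            cases pvS t <;> simp
          · have hp : ¬ (['\n'] : List Char).isPrefixOf (c :: t) := by
              simp [List.isPrefixOf]
              exact fun h => absurd h.symm hc
            rw [if_neg hp]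
            have hlen : t.length ≤ fuel := by simp at hf; omega
            rw [ih _ _ _ hlen]
            cases hS : pvS t with
            | nil => exact absurd hS (pvS_ne_nil t)
            | cons h tl => simp [pvS, hc, hS, List.modifyHead]

lemma pv_splitOn_eq_pvS (cs : List Char) : PySem.Chars.splitOn cs ['\n'] = pvS cs := by
  rw [PySem.Chars.splitOn, pv_splitOn_go (cs.length + 1) cs [] [] (by omega)]
  cases hS : pvS cs with
  | nil => exact absurd hS (pvS_ne_nil cs)
  | cons h tl => simp [List.modifyHead]

lemma pv_replace_eq_pvG (cs : List Char) :
    PySem.Chars.replace cs ('\n' :: pvExp) ['\n'] = pvG cs := by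
  rw [PySem.Chars.replace]
  simp only [List.isEmpty_cons]
  rw [if_neg (by simp)]
  exact pv_replace_go cs.length cs [] (le_refl _)

lemma pv_splitA (contents : String) :
    ((PySem.Str.split? contents "\n").getD []).map String.toList
      = PySem.Chars.splitOn contents.toList ['\n'] := by
  have h := PySem.Str.split?_map contents "\n"
  cases e : PySem.Str.split? contents "\n" with
  | none => rw [e] at h; simp [PySem.Chars.split?] at h
  | some v =>
      rw [e] at h
      simp only [Option.map_some] at h
      have hv : v.map String.toList = PySem.Chars.splitOn contents.toList ['\n'] := by
        have : PySem.Chars.split? contents.toList ("\n" : String).toList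
            = some (PySem.Chars.splitOn contents.toList ['\n']) := by
          simp [PySem.Chars.split?]
        rw [this] at h
        exact Option.some_injective _ h
      simpa using hv

lemma pv_branch_toList (line : String) :
    (if PySem.Str.slice line none (some 7) == "export "
     then PySem.Str.slice line (some 7) none else line).toList = pvStrip line.toList := by
  have htake : (PySem.Str.slice line none (some 7)).toList = line.toList.take 7 := by
    rw [PySem.Str.toList_slice]
    simp only [PySem.Chars.slice_eq_listSlice]
    rw [PySem.List.slice_to _ (b := 7) (by norm_num)]
    rfl
  have hcond : (PySem.Str.slice line none (some 7) == "export ")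
      = pvExp.isPrefixOf line.toList := by
    rw [Bool.eq_iff_iff, beq_iff_eq, List.isPrefixOf_iff_prefix]
    constructor
    · intro h
      have : line.toList.take 7 = pvExp := by
        rw [← htake, h]; rfl
      rw [← this]
      exact List.take_prefix 7 line.toList
    · intro h
      apply String.toList_inj.mp
      rw [htake]
      obtain ⟨r, hr⟩ := h
      rw [← hr]
      have : pvExp.length = 7 := rfl
      rw [List.take_append_of_le_length (by simp [pvExp])]
      simp [pvExp]
  by_cases h : pvExp.isPrefixOf line.toList
  · rw [if_pos (by rw [hcond]; exact h)]
    rw [PySem.Str.toList_slice]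
    simp only [PySem.Chars.slice_eq_listSlice]
    rw [PySem.List.slice_from _ (a := 7) (by norm_num)]
    simp [pvStrip, h]
  · rw [if_neg (by rw [hcond]; simp [h])]
    simp [pvStrip, h]

-- ===== VERDICT =====
theorem remove_exports_py_spec : Claim_equal_remove_exports_py := by
  intro contents _
  show remove_exports_py contents = remove_exports_py_alt contents
  apply String.toList_inj.mp
  set cs := contents.toList with hcs
  -- A side
  have hA : (remove_exports_py contents).toList
      = PySem.Chars.join ['\n'] ((pvS cs).map pvStrip) := by
    rw [remove_exports_py, PySem.List.foldl_append_singleton_eq_map, List.nil_append,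
      PySem.Str.toList_join, List.map_map]
    have hmaps : (((PySem.Str.split? contents "\n").getD []).map
        (String.toList ∘ fun line =>
          if PySem.Str.slice line none (some 7) == "export "
          then PySem.Str.slice line (some 7) none else line))
        = ((PySem.Str.split? contents "\n").getD []).map (pvStrip ∘ String.toList) := by
      apply List.map_congr_left
      intro line _
      simpa using pv_branch_toList line
    rw [hmaps]
    have : ((PySem.Str.split? contents "\n").getD []).map (pvStrip ∘ String.toList)
        = (((PySem.Str.split? contents "\n").getD []).map String.toList).map pvStrip := by
      rw [List.map_map]
    rw [this, pv_splitA, pv_splitOn_eq_pvS]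
    rfl
  -- B side
  have hB : (remove_exports_py_alt contents).toList = pvJ (pvStrip cs) := by
    rw [remove_exports_py_alt, PySem.Str.toList_slice]
    simp only [PySem.Chars.slice_eq_listSlice]
    rw [PySem.List.slice_from _ (a := 1) (by norm_num)]
    rw [PySem.Str.toList_replace]
    have hpre : ("\n" ++ contents).toList = '\n' :: cs := by
      rw [String.toList_append]; rfl
    have h1 : ("\nexport " : String).toList = '\n' :: pvExp := rfl
    have h2 : ("\n" : String).toList = ['\n'] := rfl
    rw [hpre, h1, h2, pv_replace_eq_pvG]
    have : pvG ('\n' :: cs) = '\n' :: pvG (pvStrip cs) := by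
      by_cases hp : pvExp.isPrefixOf cs
      · have : ('\n' :: pvExp).isPrefixOf ('\n' :: cs) := by simp [List.isPrefixOf, hp]
        simp [pvG, this, pvStrip, hp]
      · have : ¬ ('\n' :: pvExp).isPrefixOf ('\n' :: cs) := by simp [List.isPrefixOf, hp]
        simp [pvG, this, pvStrip, hp]
    rw [this]
    simp [pvG_eq_pvJ]
  rw [hA, hB, pvD]
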